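-- pv_equiv track=rewrite | github.com/doorBW/Django_with_PracticeExamples | example/chapter1/1-2_find_num.py | solution
-- ===== SOURCE A (Python) =====
-- def solution(input_str):
-- 	# - # - # - # - # - # - # - # - # - # - # - # - # - # - #
-- 	# Write your code here.
-- 	answer = ""
-- 	for i in range(10):
-- 		if str(i) in input_str:
-- 			pass
-- 		else:
-- 			answer = str(i)
-- 			break
--
-- 	return answer
-- ===== SOURCE B (Python) =====
-- def solution(input_str):
--     absent = set('0123456789') - set(input_str)
--     return min(absent) if absent else ''
-- ===== Notes on version B (the rewrite author's own statement) =====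
-- stated objective: simpler
-- what changed: Replaces A's per-digit loop with early break (each iteration doing a substring search of the input) by one set difference of the ten digit characters with the set of input characters, then a minimum over the absent set (empty string when no digit is absent).
import Mathlib
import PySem

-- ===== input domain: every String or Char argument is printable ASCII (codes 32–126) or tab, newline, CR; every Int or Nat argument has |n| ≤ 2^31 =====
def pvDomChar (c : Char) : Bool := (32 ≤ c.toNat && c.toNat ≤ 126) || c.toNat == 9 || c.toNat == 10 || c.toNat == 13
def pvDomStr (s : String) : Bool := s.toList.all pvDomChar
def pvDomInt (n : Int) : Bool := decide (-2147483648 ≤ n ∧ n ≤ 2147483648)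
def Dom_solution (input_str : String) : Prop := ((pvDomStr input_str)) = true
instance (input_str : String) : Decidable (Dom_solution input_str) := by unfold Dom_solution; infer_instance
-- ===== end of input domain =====

-- B replaces A's scan over 0..9 with an early break by one set difference and a minimum; equal on all inputs.

-- ===== PORT A =====
-- the for-loop over range(10) with break: first i with str(i) not in input_str, else answer stays ""
def solLoopA : List Int → String → String
  | [], _ => ""
  | i :: rest, s =>
      if PySem.Str.isIn (PySem.Int.toStr i) s then solLoopA rest s
      else PySem.Int.toStr i

def solution (input_str : String) : String :=
  solLoopA (PySem.List.pyRange 0 10 1) input_str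

-- ===== PORT B =====
def solution_alt (input_str : String) : String :=
  let absent : PySem.Set Char :=
    PySem.Set.diff (PySem.Set.ofList "0123456789".toList) (PySem.Set.ofList input_str.toList)
  if absent ≠ [] then
    match PySem.List.min? absent (fun c => c) with
    | some c => String.ofList [c]
    | none => ""
  else ""

-- ===== PRECONDITION & SPEC =====
def Spec_solution (input_str : String) (out : String) : Prop := out = solution_alt input_str
instance (input_str : String) (out : String) : Decidable (Spec_solution input_str out) := by unfold Spec_solution; infer_instance

-- ===== CLAIM (what is proved, stated in full; the proofs are below) =====
def Claim_equal_solution : Prop := ∀ (input_str : String), Dom_solution input_str → Spec_solution input_str (solution input_str)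

-- ===== LEMMAS AND PROOFS =====

-- nested-if first-absent scan equals head? of the filtered list
lemma loopA_eq_filter_head (ds : List Int) (s : String) :
    solLoopA ds s =
      match (ds.filter (fun i => !PySem.Chars.isIn (PySem.Int.toChars i) s.toList)).head? with
      | some i => PySem.Int.toStr i
      | none => "" := by
  induction ds with
  | nil => rfl
  | cons i rest ih =>
      by_cases h : PySem.Chars.isIn (PySem.Int.toChars i) s.toList
      · simp [solLoopA, h, ih]
      · simp [solLoopA, h]

lemma isIn_singleton (c : Char) (l : List Char) : PySem.Chars.isIn [c] l = l.contains c := by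
  by_cases h : c ∈ l
  · have h1 : PySem.Chars.isIn [c] l = true :=
      (PySem.Chars.isIn_iff_infix _ _).mpr (by obtain ⟨s,t,rfl⟩ := List.append_of_mem h; exact ⟨s,t, by simp⟩)
    simp [h1, h]
  · have h1 : PySem.Chars.isIn [c] l ≠ true := fun hh =>
      h (List.singleton_sublist.mp ((PySem.Chars.isIn_iff_infix _ _).mp hh).sublist)
    simp [Bool.eq_false_iff.mpr h1, h]

lemma contains_ofList (l : List Char) (c : Char) :
    PySem.Set.contains (PySem.Set.ofList l) c = l.contains c := by
  by_cases h : c ∈ l <;> simp [PySem.Set.mem_ofList, h]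

-- ===== VERDICT (by name: the statement is the Claim_ definition above) =====
set_option maxHeartbeats 2000000 in
theorem solution_spec : Claim_equal_solution := by
  intro s _
  unfold Spec_solution solution solution_alt
  rw [show PySem.List.pyRange 0 10 1 = [0,1,2,3,4,5,6,7,8,9] from by decide, loopA_eq_filter_head]
  simp only [PySem.Set.diff,
    show PySem.Set.ofList "0123456789".toList = ['0','1','2','3','4','5','6','7','8','9'] from by decide,
    contains_ofList, List.filter_cons, List.filter_nil,
    show PySem.Int.toChars 0 = ['0'] from by decide,
    show PySem.Int.toChars 1 = ['1'] from by decide,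
    show PySem.Int.toChars 2 = ['2'] from by decide,
    show PySem.Int.toChars 3 = ['3'] from by decide,
    show PySem.Int.toChars 4 = ['4'] from by decide,
    show PySem.Int.toChars 5 = ['5'] from by decide,
    show PySem.Int.toChars 6 = ['6'] from by decide,
    show PySem.Int.toChars 7 = ['7'] from by decide,
    show PySem.Int.toChars 8 = ['8'] from by decide,
    show PySem.Int.toChars 9 = ['9'] from by decide,
    isIn_singleton]
  generalize s.toList.contains '0' = b0
  generalize s.toList.contains '1' = b1
  generalize s.toList.contains '2' = b2
  generalize s.toList.contains '3' = b3
  generalize s.toList.contains '4' = b4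
  generalize s.toList.contains '5' = b5
  generalize s.toList.contains '6' = b6
  generalize s.toList.contains '7' = b7
  generalize s.toList.contains '8' = b8
  generalize s.toList.contains '9' = b9
  revert b0 b1 b2 b3 b4 b5 b6 b7 b8 b9
  decide
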